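-- pv_equiv track=rewrite | github.com/Trilian/assistant_matanne | src/modules/cuisine/courses/utils_operations.py | grouper_par_rayon
-- ===== SOURCE A (Python) =====
-- def grouper_par_rayon(articles: list[dict]) -> dict[str, list[dict]]:
--     """
--     Groupe les articles par rayon de magasin.
--
--     Args:
--         articles: Liste des articles
--
--     Returns:
--         Dictionnaire {rayon: [articles]}
--     """
--     rayons = {}
--     for article in articles:
--         rayon = article.get("rayon_magasin", "Autre")
--         if rayon not in rayons:
--             rayons[rayon] = []
--         rayons[rayon].append(article)
--
--     return rayons
-- ===== SOURCE B (Python) =====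
-- def grouper_par_rayon(articles: list[dict]) -> dict[str, list[dict]]:
--     """
--     Groupe les articles par rayon de magasin.
--
--     Deux passes: d'abord les rayons distincts dans l'ordre de premiere
--     apparition, puis une comprehension filtrante par rayon.
--     """
--     rayons = list(dict.fromkeys(a.get("rayon_magasin", "Autre") for a in articles))
--     return {r: [a for a in articles if a.get("rayon_magasin", "Autre") == r]
--             for r in rayons}
-- ===== Notes on version B (the rewrite author's own statement) =====
-- stated objective: alternative
-- what changed: Replaces the single incremental dict-building loop by a two-pass scheme: an ordered dedup of the aisle keys followed by one filtering comprehension per distinct aisle.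
import Mathlib
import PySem

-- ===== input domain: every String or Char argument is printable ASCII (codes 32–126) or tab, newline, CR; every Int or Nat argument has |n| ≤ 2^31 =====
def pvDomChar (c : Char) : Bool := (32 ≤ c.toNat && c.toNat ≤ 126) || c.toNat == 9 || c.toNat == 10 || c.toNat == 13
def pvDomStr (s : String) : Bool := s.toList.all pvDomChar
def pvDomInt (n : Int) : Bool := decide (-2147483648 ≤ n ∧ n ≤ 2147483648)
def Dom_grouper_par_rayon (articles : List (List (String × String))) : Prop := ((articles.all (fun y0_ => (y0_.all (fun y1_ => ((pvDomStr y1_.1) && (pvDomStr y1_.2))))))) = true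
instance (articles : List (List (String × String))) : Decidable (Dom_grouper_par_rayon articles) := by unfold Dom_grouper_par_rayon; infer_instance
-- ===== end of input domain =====

-- B replaces A's single incremental dict-building loop by two passes (ordered dedup of the
-- aisle keys, then one filtering pass per distinct aisle); same result, no speed claim.

-- article.get("rayon_magasin", "Autre") — shared lookup, exact Python dict.get on the assoc list
def pvRayon (article : List (String × String)) : String :=
  (PySem.Dict.mk article).getD "rayon_magasin" "Autre"

-- ===== PORT A =====
def grouper_par_rayon (articles : List (List (String × String))) : List (String × List (List (String × String))) :=
  (articles.foldl
    (fun rayons article =>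
      let rayon := pvRayon article
      let rayons := if rayons.contains rayon then rayons else rayons.insert rayon []
      rayons.modify rayon [] (· ++ [article]))
    PySem.Dict.empty).items

-- ===== PORT B =====
def grouper_par_rayon_alt (articles : List (List (String × String))) : List (String × List (List (String × String))) :=
  let keys := PySem.List.dedup (articles.map pvRayon)
  keys.map (fun r => (r, articles.filter (fun a => pvRayon a == r)))

-- ===== PRECONDITION & SPEC =====
def Spec_grouper_par_rayon (articles : List (List (String × String))) (out : List (String × List (List (String × String)))) : Prop := out = grouper_par_rayon_alt articles
instance (articles : List (List (String × String))) (out : List (String × List (List (String × String)))) : Decidable (Spec_grouper_par_rayon articles out) := by unfold Spec_grouper_par_rayon; infer_instance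

-- ===== CLAIM (what is proved, stated in full; the proofs are below) =====
def Claim_equal_grouper_par_rayon : Prop := ∀ (articles : List (List (String × String))), Dom_grouper_par_rayon articles → Spec_grouper_par_rayon articles (grouper_par_rayon articles)

-- ===== LEMMAS AND PROOFS =====

-- A's loop body "if absent, insert []; then append" is extensionally one modify step
theorem pv_step_eq (d : PySem.Dict String (List (List (String × String)))) (r : String)
    (x : List (String × String)) :
    (if d.contains r then d else d.insert r []).modify r [] (· ++ [x])
      = d.modify r [] (· ++ [x]) := by
  by_cases h : d.contains r
  · simp [h]
  · obtain ⟨l⟩ := d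
    simp only [PySem.Dict.contains_mk, List.any_eq_true, not_exists, not_and, Bool.not_eq_true] at h
    have hany : (l.any fun p => p.1 == r) = false := by rw [List.any_eq_false]; simpa using h
    have hfind : List.find? (fun p => p.1 == r) l = none := by rw [List.find?_eq_none]; simpa using h
    simp [PySem.Dict.modify, PySem.Dict.insert, PySem.Dict.contains_mk, hany, PySem.Dict.getD,
      PySem.Dict.get?, hfind]
    exact (List.map_congr_left (fun p hp => by
      simp [show ¬ p.1 = r from fun e => by simpa [e] using h p hp])).trans (List.map_id _)

-- A's fold is the canonical key/value modify-fold over (key, article) pairs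
theorem pv_fold_eq (articles : List (List (String × String)))
    (d : PySem.Dict String (List (List (String × String)))) :
    articles.foldl
      (fun rayons article =>
        let rayon := pvRayon article
        let rayons := if rayons.contains rayon then rayons else rayons.insert rayon []
        rayons.modify rayon [] (· ++ [article])) d
    = (articles.map (fun a => (pvRayon a, a))).foldl
        (fun d p => d.modify p.1 [] (· ++ [p.2])) d := by
  induction articles generalizing d with
  | nil => rfl
  | cons a rest ih => simpa [pv_step_eq] using ih (d.modify (pvRayon a) [] (· ++ [a]))

-- the items of that modify-fold are exactly B's dedup-then-filter table
theorem pv_items_eq (articles : List (List (String × String))) :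
    ((articles.map (fun a => (pvRayon a, a))).foldl
        (fun d p => d.modify p.1 [] (· ++ [p.2])) PySem.Dict.empty).items
    = (PySem.List.dedup (articles.map pvRayon)).map
        (fun r => (r, articles.filter (fun a => pvRayon a == r))) := by
  set pairs := articles.map (fun a => (pvRayon a, a)) with hp
  set D := pairs.foldl (fun d p => d.modify p.1 [] (· ++ [p.2])) PySem.Dict.empty with hD
  have hnd : D.keys.Nodup :=
    PySem.Dict.nodup_keys_foldl_modify_key pairs Prod.fst [] (fun d p => (· ++ [p.2]))
      PySem.Dict.empty (by simp [PySem.Dict.keys_empty])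
  have hkeys : D.keys = PySem.List.dedup (articles.map pvRayon) := by
    rw [hD, PySem.Dict.keys_foldl_modify_key]
    simp [PySem.Dict.keys_empty, PySem.Set.update_nil_left, hp, List.map_map]
    rfl
  rw [PySem.Dict.items_eq_map_keys D hnd [], hkeys]
  refine List.map_congr_left (fun r hr => ?_)
  have hget : D.getD r [] = (pairs.filter (fun p => p.1 == r)).map (·.2) := by
    rw [hD, PySem.Dict.getD_foldl_modify_append]
    simp [PySem.Dict.getD_empty]
  rw [hget, hp, List.filter_map, List.map_map]
  simp [Function.comp_def]

-- ===== VERDICT (by name: the statement is the Claim_ definition above) =====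
theorem grouper_par_rayon_spec : Claim_equal_grouper_par_rayon := by
  intro articles _
  show grouper_par_rayon articles = grouper_par_rayon_alt articles
  rw [grouper_par_rayon, grouper_par_rayon_alt, pv_fold_eq, pv_items_eq]
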